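-- pv_equiv track=rewrite | github.com/guidotheelen/AOC2024 | day04/solutions/solution_part1.py | get_diagonal_lines
-- ===== SOURCE A (Python) =====
-- def get_diagonal_lines(lines):
--     m = len(lines)
--     n = max(len(line) for line in lines)
--     diagonals = []
--
--     # Diagonals from top-left to bottom-right (i + j = k)
--     for k in range(m + n - 1):
--         diag = ""
--         for i in range(m):
--             j = k - i
--             if 0 <= j < len(lines[i]):
--                 diag += lines[i][j]
--         if diag:
--             diagonals.append(diag)
--
--     # Diagonals from top-right to bottom-left (j - i = k)
--     for k in range(n - 1, -m, -1):
--         diag = ""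
--         for i in range(m):
--             j = i + k
--             if 0 <= j < len(lines[i]):
--                 diag += lines[i][j]
--         if diag:
--             diagonals.append(diag)
--
--     return diagonals
-- ===== SOURCE B (Python) =====
-- def get_diagonal_lines(lines):
--     m = len(lines)
--     n = max((len(line) for line in lines), default=0)
--     d1 = {}
--     d2 = {}
--     # single pass: bucket every cell by i+j (TL-BR) and j-i (TR-BL)
--     for i, line in enumerate(lines):
--         for j, ch in enumerate(line):
--             d1[i + j] = d1.get(i + j, "") + ch
--             d2[j - i] = d2.get(j - i, "") + ch
--     result = [d1[k] for k in range(m + n - 1) if k in d1]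
--     result += [d2[k] for k in range(n - 1, -m, -1) if k in d2]
--     return result
-- ===== Notes on version B (the rewrite author's own statement) =====
-- stated objective: faster
-- what changed: Instead of scanning all m rows for each of the 2(m+n-1) diagonal indices, B makes one pass over the cells, bucketing each character into two dicts keyed by i+j and j-i, then emits the non-empty buckets in A's diagonal order.
import Mathlib
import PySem

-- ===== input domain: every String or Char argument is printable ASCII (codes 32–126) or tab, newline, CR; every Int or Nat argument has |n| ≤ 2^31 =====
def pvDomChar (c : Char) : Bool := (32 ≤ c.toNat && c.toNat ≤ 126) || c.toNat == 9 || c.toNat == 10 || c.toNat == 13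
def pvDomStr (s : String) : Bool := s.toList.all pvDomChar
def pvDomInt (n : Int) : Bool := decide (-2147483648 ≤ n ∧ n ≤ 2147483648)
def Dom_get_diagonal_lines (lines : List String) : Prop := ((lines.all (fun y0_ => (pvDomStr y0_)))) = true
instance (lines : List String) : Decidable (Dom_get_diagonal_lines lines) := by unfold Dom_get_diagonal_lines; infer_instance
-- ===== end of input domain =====

-- B replaces A's per-diagonal scans of all rows by one bucketing pass over the cells,
-- keyed by i+j and j-i (objective: faster).

-- ===== PORT A =====
-- A, transliterated: strings are handled as their char lists (PySem.Chars convention),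
-- String.ofList at the end; 'lines[i]' with i ∈ range(m) is always in range, so it is
-- PySem.List.pyGetD with an unused default; 'lines[i][j]' is guarded by 0 ≤ j < len(lines[i]),
-- so '(pyGet? row j).toList' is exactly the one-character append 'diag += lines[i][j]'.
def get_diagonal_lines (lines : List String) : List String :=
  let rows : List (List Char) := lines.map String.toList
  let m : Int := rows.length
  match PySem.List.max? (rows.map (fun r => (r.length : Int))) (fun x => x) with
  | none => []   -- lines = []: Python raises ValueError (max of empty sequence); excluded by Pre_
  | some n =>
    let diags1 := (PySem.List.pyRange 0 (m + n - 1) 1).foldl (fun acc k =>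
      let diag := (PySem.List.pyRange 0 m 1).foldl (fun diag i =>
        let row := PySem.List.pyGetD rows i []
        let j := k - i
        if 0 ≤ j ∧ j < (row.length : Int) then diag ++ (PySem.List.pyGet? row j).toList
        else diag) []
      if diag ≠ [] then acc ++ [diag] else acc) []
    let diags := (PySem.List.pyRange (n - 1) (-m) (-1)).foldl (fun acc k =>
      let diag := (PySem.List.pyRange 0 m 1).foldl (fun diag i =>
        let row := PySem.List.pyGetD rows i []
        let j := i + k
        if 0 ≤ j ∧ j < (row.length : Int) then diag ++ (PySem.List.pyGet? row j).toList
        else diag) []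
      if diag ≠ [] then acc ++ [diag] else acc) diags1
    diags.map String.ofList

-- ===== PORT B =====
-- B, transliterated: the nested 'for i,line / for j,ch' loop updates the two dicts
-- ('d[k] = d.get(k, "") + ch' is Dict.modify k [] (· ++ [ch])); then the buckets are
-- emitted in the two diagonal-index orders.
def get_diagonal_lines_alt (lines : List String) : List String :=
  let rows : List (List Char) := lines.map String.toList
  let m : Int := rows.length
  let n : Int := PySem.List.maxD (rows.map (fun r => (r.length : Int))) (fun x => x) 0
  let dd := (PySem.List.enumerate rows 0).foldl (fun ds p =>
      (PySem.List.enumerate p.2 0).foldl (fun ds q =>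
        (ds.1.modify (p.1 + q.1) [] (· ++ [q.2]),
         ds.2.modify (q.1 - p.1) [] (· ++ [q.2]))) ds)
    ((PySem.Dict.empty : PySem.Dict Int (List Char)),
     (PySem.Dict.empty : PySem.Dict Int (List Char)))
  let res1 := (PySem.List.pyRange 0 (m + n - 1) 1).foldl (fun acc k =>
      if dd.1.contains k then acc ++ [dd.1.getD k []] else acc) []
  let res := (PySem.List.pyRange (n - 1) (-m) (-1)).foldl (fun acc k =>
      if dd.2.contains k then acc ++ [dd.2.getD k []] else acc) res1
  res.map String.ofList

-- ===== PRECONDITION & SPEC =====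
-- Pre_ excludes only the empty list, on which Python A raises ValueError (max() of an empty sequence).
def Pre_get_diagonal_lines (lines : List String) : Prop := lines ≠ []
instance (lines : List String) : Decidable (Pre_get_diagonal_lines lines) := by unfold Pre_get_diagonal_lines; infer_instance
def pvWitness_get_diagonal_lines : List String := ["ab", "c"]

def Spec_get_diagonal_lines (lines : List String) (out : List String) : Prop := out = get_diagonal_lines_alt lines
instance (lines : List String) (out : List String) : Decidable (Spec_get_diagonal_lines lines out) := by unfold Spec_get_diagonal_lines; infer_instance

-- ===== CLAIM (what is proved, stated in full; the proofs are below) =====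
def Claim_equal_get_diagonal_lines : Prop := ∀ (lines : List String), Dom_get_diagonal_lines lines → Pre_get_diagonal_lines lines → Spec_get_diagonal_lines lines (get_diagonal_lines lines)

-- ===== LEMMAS AND PROOFS =====

-- the cell lists B's nested loop traverses, with the d1-key i+j resp. the d2-key j-i
def pvCells1 (rows : List (List Char)) (s : Int) : List (Int × Char) :=
  (PySem.List.enumerate rows s).flatMap (fun p => (PySem.List.enumerate p.2 0).map (fun q => (p.1 + q.1, q.2)))
def pvCells2 (rows : List (List Char)) (s : Int) : List (Int × Char) :=
  (PySem.List.enumerate rows s).flatMap (fun p => (PySem.List.enumerate p.2 0).map (fun q => (q.1 - p.1, q.2)))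

-- B's nested loop over the two dicts is one bucketing fold over each cell list
lemma pvNestedFold (rows : List (List Char)) (s : Int)
    (d₁ d₂ : PySem.Dict Int (List Char)) :
    (PySem.List.enumerate rows s).foldl (fun ds p =>
        (PySem.List.enumerate p.2 0).foldl (fun ds q =>
          (ds.1.modify (p.1 + q.1) [] (· ++ [q.2]),
           ds.2.modify (q.1 - p.1) [] (· ++ [q.2]))) ds) (d₁, d₂)
    = ((pvCells1 rows s).foldl (fun d p => d.modify p.1 [] (· ++ [p.2])) d₁,
       (pvCells2 rows s).foldl (fun d p => d.modify p.1 [] (· ++ [p.2])) d₂) := by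
  induction rows generalizing s d₁ d₂ with
  | nil => simp [pvCells1, pvCells2, PySem.List.enumerate]
  | cons r rows ih =>
    rw [PySem.List.enumerate_cons, List.foldl_cons]
    rw [PySem.List.foldl_prod_mk
        (f := fun d (q : Int × Char) => PySem.Dict.modify d (s + q.1) [] (· ++ [q.2]))
        (g := fun d (q : Int × Char) => PySem.Dict.modify d (q.1 - s) [] (· ++ [q.2]))]
    rw [ih]
    simp only [pvCells1, pvCells2, PySem.List.enumerate_cons, List.flatMap_cons,
      List.foldl_append, List.foldl_map]

-- a filtered enumeration keeps at most the one index-t element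
lemma pvEnumFilterMap (xs : List Char) (s t : Int) :
    (((PySem.List.enumerate xs s).filter (fun q => q.1 == t)).map (·.2))
    = if s ≤ t then (xs[(t - s).toNat]?).toList else [] := by
  induction xs generalizing s with
  | nil => simp [PySem.List.enumerate]
  | cons x xs ih =>
    rw [PySem.List.enumerate_cons]
    by_cases h : s = t
    · subst h
      have h2 : ¬ (s + 1 ≤ s) := by omega
      simp [ih, h2]
    · have h3 : (s == t) = false := by simp [h]
      rw [List.filter_cons]
      simp only [h3, Bool.false_eq_true, if_false, ih]
      by_cases h4 : s ≤ t
      · have h5 : s + 1 ≤ t := by omega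
        have h6 : (t - s).toNat = (t - (s + 1)).toNat + 1 := by omega
        simp [h4, h5, h6]
      · have h5 : ¬ (s + 1 ≤ t) := by omega
        simp [h4, h5]

lemma pvRowBucket (row : List Char) (t : Int) :
    (((PySem.List.enumerate row 0).filter (fun q => q.1 == t)).map (·.2))
    = if 0 ≤ t ∧ t < (row.length : Int) then (PySem.List.pyGet? row t).toList else [] := by
  rw [pvEnumFilterMap]
  by_cases h1 : 0 ≤ t
  · rw [if_pos h1]
    by_cases h2 : t < (row.length : Int)
    · rw [if_pos ⟨h1, h2⟩, PySem.List.pyGet?_of_nonneg _ h1]; simp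
    · rw [if_neg (by tauto)]
      have h3 : row.length ≤ (t - 0).toNat := by omega
      rw [List.getElem?_eq_none h3]; rfl
  · rw [if_neg h1, if_neg (by omega)]

-- A's inner scan over the rows produces exactly the i+j = k bucket
lemma pvDiagTL (rows : List (List Char)) (k : Int) :
    ((PySem.List.pyRange 0 (rows.length : Int) 1).foldl (fun diag i =>
        if 0 ≤ k - i ∧ k - i < ((PySem.List.pyGetD rows i []).length : Int)
        then diag ++ (PySem.List.pyGet? (PySem.List.pyGetD rows i []) (k - i)).toList
        else diag) [])
    = ((pvCells1 rows 0).filter (fun p => p.1 == k)).map (·.2) := by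
  have hl : (PySem.List.pyRange 0 (rows.length : Int) 1).foldl (fun diag i =>
        if 0 ≤ k - i ∧ k - i < ((PySem.List.pyGetD rows i []).length : Int)
        then diag ++ (PySem.List.pyGet? (PySem.List.pyGetD rows i []) (k - i)).toList
        else diag) ([] : List Char)
      = (PySem.List.enumerate rows 0).foldl (fun diag p =>
          diag ++ (if 0 ≤ k - p.1 ∧ k - p.1 < (p.2.length : Int)
                   then (PySem.List.pyGet? p.2 (k - p.1)).toList else [])) [] := by
    rw [show PySem.List.enumerate rows 0 = PySem.List.enumerate rows from rfl,
      PySem.List.enumerate_eq_map_pyRange rows [], List.foldl_map]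
    simp only [PySem.List.len_eq]
    apply PySem.List.foldl_congr_mem
    intro acc x _
    split_ifs with h
    · rfl
    · simp
  rw [hl, PySem.List.foldl_append_eq_flatMap]
  simp only [pvCells1, List.filter_flatMap, List.map_flatMap, List.nil_append]
  apply List.flatMap_congr
  intro p _
  rw [List.filter_map, List.map_map]
  have e1 : ((fun (x : Int × Char) => x.1 == k) ∘ fun q => (p.1 + q.1, q.2))
      = (fun (q : Int × Char) => q.1 == k - p.1) := by
    funext q; simp only [Function.comp]
    by_cases h : q.1 = k - p.1 <;> simp [h] <;> omega
  have e2 : ((fun (x : Int × Char) => x.2) ∘ fun (q : Int × Char) => (p.1 + q.1, q.2))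
      = (fun (q : Int × Char) => q.2) := rfl
  rw [e1, e2, pvRowBucket p.2 (k - p.1)]

-- A's inner scan over the rows produces exactly the j-i = k bucket
lemma pvDiagTR (rows : List (List Char)) (k : Int) :
    ((PySem.List.pyRange 0 (rows.length : Int) 1).foldl (fun diag i =>
        if 0 ≤ i + k ∧ i + k < ((PySem.List.pyGetD rows i []).length : Int)
        then diag ++ (PySem.List.pyGet? (PySem.List.pyGetD rows i []) (i + k)).toList
        else diag) [])
    = ((pvCells2 rows 0).filter (fun p => p.1 == k)).map (·.2) := by
  have hl : (PySem.List.pyRange 0 (rows.length : Int) 1).foldl (fun diag i =>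
        if 0 ≤ i + k ∧ i + k < ((PySem.List.pyGetD rows i []).length : Int)
        then diag ++ (PySem.List.pyGet? (PySem.List.pyGetD rows i []) (i + k)).toList
        else diag) ([] : List Char)
      = (PySem.List.enumerate rows 0).foldl (fun diag p =>
          diag ++ (if 0 ≤ p.1 + k ∧ p.1 + k < (p.2.length : Int)
                   then (PySem.List.pyGet? p.2 (p.1 + k)).toList else [])) [] := by
    rw [show PySem.List.enumerate rows 0 = PySem.List.enumerate rows from rfl,
      PySem.List.enumerate_eq_map_pyRange rows [], List.foldl_map]
    simp only [PySem.List.len_eq]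
    apply PySem.List.foldl_congr_mem
    intro acc x _
    split_ifs with h
    · rfl
    · simp
  rw [hl, PySem.List.foldl_append_eq_flatMap]
  simp only [pvCells2, List.filter_flatMap, List.map_flatMap, List.nil_append]
  apply List.flatMap_congr
  intro p _
  rw [List.filter_map, List.map_map]
  have e1 : ((fun (x : Int × Char) => x.1 == k) ∘ fun (q : Int × Char) => (q.1 - p.1, q.2))
      = (fun (q : Int × Char) => q.1 == p.1 + k) := by
    funext q; simp only [Function.comp]
    by_cases h : q.1 = p.1 + k <;> simp [h] <;> omega
  have e2 : ((fun (x : Int × Char) => x.2) ∘ fun (q : Int × Char) => (q.1 - p.1, q.2))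
      = (fun (q : Int × Char) => q.2) := rfl
  rw [e1, e2, pvRowBucket p.2 (p.1 + k)]

-- the dict built by the bucketing fold contains k iff the k-bucket is non-empty
lemma pvContains (cells : List (Int × Char)) (k : Int) :
    ((cells.foldl (fun d p => d.modify p.1 [] (· ++ [p.2])) (PySem.Dict.empty : PySem.Dict Int (List Char))).contains k)
    = !((cells.filter (fun p => p.1 == k)).map (·.2)).isEmpty := by
  have hk := PySem.Dict.keys_foldl_modify_key cells (fun (p : Int × Char) => p.1) []
      (fun d p => (· ++ [p.2])) (PySem.Dict.empty : PySem.Dict Int (List Char))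
  have hc : ∀ (d : PySem.Dict Int (List Char)), d.contains k = decide (k ∈ d.keys) := by
    intro d; simp [pysem]
  rw [hc, hk]
  have he : PySem.Set.update (PySem.Dict.empty : PySem.Dict Int (List Char)).keys (cells.map (fun p => p.1))
      = PySem.Set.ofList (cells.map (fun p => p.1)) := rfl
  rw [he, Bool.eq_iff_iff]
  rw [show ∀ (l : List Char), (!l.isEmpty) = true ↔ l ≠ [] from fun l => by cases l <;> simp]
  simp only [decide_eq_true_eq, PySem.Set.mem_ofList, List.mem_map,
    Ne, List.map_eq_nil_iff, List.filter_eq_nil_iff, beq_iff_eq, not_forall]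
  constructor
  · rintro ⟨p, hp, rfl⟩; exact ⟨p, hp, by simp⟩
  · rintro ⟨p, hp, h⟩; exact ⟨p, hp, by simpa using h⟩

-- A appends a non-empty diagonal exactly when B's dict holds its (equal) bucket
lemma pvBranch (acc : List (List Char)) (x y : List Char) (hb : x = y) (c : Bool)
    (hc : c = !y.isEmpty) :
    (if x ≠ [] then acc ++ [x] else acc) = (if c then acc ++ [y] else acc) := by
  subst hb; subst hc; cases x <;> simp

-- ===== VERDICT (by name: the statement is the Claim_ definition above) =====
theorem get_diagonal_lines_spec : Claim_equal_get_diagonal_lines := by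
  intro lines _ hpre
  unfold Spec_get_diagonal_lines
  obtain ⟨l, ls, rfl⟩ := List.exists_cons_of_ne_nil hpre
  unfold get_diagonal_lines get_diagonal_lines_alt
  simp only [List.map_cons, PySem.List.max?_id_cons, PySem.List.maxD_id_cons, pvNestedFold]
  apply congrArg
  generalize (String.toList l :: List.map String.toList ls) = rows
  have hg1 : ∀ k : Int, ((pvCells1 rows 0).foldl (fun d p => d.modify p.1 [] (· ++ [p.2]))
      (PySem.Dict.empty : PySem.Dict Int (List Char))).getD k []
      = ((pvCells1 rows 0).filter (fun p => p.1 == k)).map (·.2) := by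
    intro k; rw [PySem.Dict.getD_foldl_modify_append]; simp [pysem]
  have hg2 : ∀ k : Int, ((pvCells2 rows 0).foldl (fun d p => d.modify p.1 [] (· ++ [p.2]))
      (PySem.Dict.empty : PySem.Dict Int (List Char))).getD k []
      = ((pvCells2 rows 0).filter (fun p => p.1 == k)).map (·.2) := by
    intro k; rw [PySem.Dict.getD_foldl_modify_append]; simp [pysem]
  congr 1
  · funext acc k
    exact pvBranch acc _ _ ((pvDiagTR rows k).trans (hg2 k).symm) _ (by rw [pvContains, hg2 k])
  · congr 1
    funext acc k
    exact pvBranch acc _ _ ((pvDiagTL rows k).trans (hg1 k).symm) _ (by rw [pvContains, hg1 k])
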